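-- pv_equiv track=rewrite | github.com/Vahe03/Python-level-1 | Algorithm_homework.py | robber
-- ===== SOURCE A (Python) =====
-- def robber(houses):
--     money = 0
--     for i in range(0, len(houses), 2):
--         for j in range(1, len(houses), 2):
--             if houses[i] > houses[j]:
--                 money += houses[i]
--
--             else:
--                 money += houses[j]
--     return money
-- ===== SOURCE B (Python) =====
-- def robber(houses):
--     evens, odds = [], []
--     for idx, h in enumerate(houses):
--         if idx % 2 == 0:
--             evens.append(h)
--         else:
--             odds.append(h)
--     evens.sort()
--     odds.sort()
--     money = 0
--     i = j = 0
--     ne, no = len(evens), len(odds)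
--     while i < ne and j < no:
--         if odds[j] < evens[i]:
--             money += i * odds[j]
--             j += 1
--         else:
--             money += j * evens[i]
--             i += 1
--     money += j * sum(evens[i:]) + i * sum(odds[j:])
--     return money
-- ===== Notes on version B (the rewrite author's own statement) =====
-- stated objective: faster
-- what changed: A sums max(houses[i], houses[j]) over all even-index/odd-index pairs with two nested index loops; B splits the values by index parity once, sorts both halves and computes the same pairwise-max sum with a single two-pointer merge that counts how many elements of the other half each value dominates.
import Mathlib
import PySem

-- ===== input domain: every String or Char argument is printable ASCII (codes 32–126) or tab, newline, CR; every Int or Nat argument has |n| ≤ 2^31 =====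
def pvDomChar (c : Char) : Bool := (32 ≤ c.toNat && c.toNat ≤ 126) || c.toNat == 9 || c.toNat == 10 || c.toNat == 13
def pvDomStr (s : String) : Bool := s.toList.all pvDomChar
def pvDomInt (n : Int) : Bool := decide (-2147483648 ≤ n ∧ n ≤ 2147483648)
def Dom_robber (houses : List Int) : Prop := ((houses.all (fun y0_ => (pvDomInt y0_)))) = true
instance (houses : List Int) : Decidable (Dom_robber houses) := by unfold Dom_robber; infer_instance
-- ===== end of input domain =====

-- B replaces A's quadratic double loop over index pairs by splitting the even/odd-index values,
-- sorting both halves and a two-pointer merge count; the RETURN value is proved equal on all inputs.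

-- ===== PORT A =====
def robber (houses : List Int) : Int :=
  (PySem.List.pyRange 0 (PySem.List.len houses) 2).foldl
    (fun money i =>
      (PySem.List.pyRange 1 (PySem.List.len houses) 2).foldl
        (fun money j =>
          if PySem.List.pyGetD houses i 0 > PySem.List.pyGetD houses j 0 then
            money + PySem.List.pyGetD houses i 0
          else
            money + PySem.List.pyGetD houses j 0)
        money)
    0

-- ===== PORT B =====
-- 'for idx, h in enumerate(houses): append h to evens/odds by parity of idx'
def robberSplit (houses : List Int) : List Int × List Int :=
  (PySem.List.enumerate houses 0).foldl
    (fun acc p =>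
      if PySem.Int.mod p.1 2 == 0 then (acc.1 ++ [p.2], acc.2)
      else (acc.1, acc.2 ++ [p.2]))
    ([], [])

-- the 'while i < ne and j < no' two-pointer merge loop of Source B; returns (i, j, money)
def robberLoop (es os : List Int) (ne no : Int) (i j money : Int) : Int × Int × Int :=
  if h : i < ne ∧ j < no then
    (if PySem.List.pyGetD os j 0 < PySem.List.pyGetD es i 0 then
      robberLoop es os ne no i (j + 1) (money + i * PySem.List.pyGetD os j 0)
    else
      robberLoop es os ne no (i + 1) j (money + j * PySem.List.pyGetD es i 0))
  else (i, j, money)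
termination_by ((ne - i) + (no - j)).toNat
decreasing_by all_goals (obtain ⟨h1, h2⟩ := h; omega)

def robber_alt (houses : List Int) : Int :=
  let p := robberSplit houses
  let es := PySem.List.sorted p.1 (fun x => x) false
  let os := PySem.List.sorted p.2 (fun x => x) false
  let r := robberLoop es os (PySem.List.len es) (PySem.List.len os) 0 0 0
  r.2.2 + r.2.1 * (PySem.List.slice es (some r.1) none).sum
        + r.1 * (PySem.List.slice os (some r.2.1) none).sum

-- ===== PRECONDITION & SPEC =====
def Spec_robber (houses : List Int) (out : Int) : Prop := out = robber_alt houses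
instance (houses : List Int) (out : Int) : Decidable (Spec_robber houses out) := by unfold Spec_robber; infer_instance

-- ===== CLAIM (what is proved, stated in full; the proofs are below) =====
def Claim_equal_robber : Prop := ∀ (houses : List Int), Dom_robber houses → Spec_robber houses (robber houses)

-- ===== LEMMAS AND PROOFS =====

-- values of a list at even indices / odd indices ("deinterleave")
def deint : List Int → List Int × List Int
  | [] => ([], [])
  | x :: xs => (x :: (deint xs).2, (deint xs).1)

-- Σ_{e ∈ es} Σ_{o ∈ os} (e if e > o else o): the common mathematical core of both programs
def dsum (es os : List Int) : Int :=
  (es.map (fun e => (os.map (fun o => if e > o then e else o)).sum)).sum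

lemma pyRange2_shift (a b : Int) :
    PySem.List.pyRange (a + 1) (b + 1) 2 = (PySem.List.pyRange a b 2).map (· + 1) := by
  rw [PySem.List.pyRange_of_pos _ _ (by norm_num), PySem.List.pyRange_of_pos _ _ (by norm_num),
    List.map_map]
  have hc : (if a + 1 < b + 1 then ((b + 1 - (a + 1) + 2 - 1) / 2).toNat else 0)
      = (if a < b then ((b - a + 2 - 1) / 2).toNat else 0) := by
    split_ifs with h1 h2 h2 <;> omega
  rw [hc]
  exact List.map_congr_left (fun k _ => by simp [Function.comp]; ring)

lemma pyRange2_cons {a b : Int} (h : a < b) :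
    PySem.List.pyRange a b 2 = a :: PySem.List.pyRange (a + 2) b 2 := by
  rw [PySem.List.pyRange_of_pos _ _ (by norm_num), PySem.List.pyRange_of_pos _ _ (by norm_num)]
  have hc : (if a < b then ((b - a + 2 - 1) / 2).toNat else 0)
      = (if a + 2 < b then ((b - (a + 2) + 2 - 1) / 2).toNat else 0) + 1 := by
    split_ifs with h1 h2 <;> omega
  rw [hc, List.range_succ_eq_map, List.map_cons, List.map_map]
  refine congrArg₂ _ (by simp) ?_
  exact List.map_congr_left (fun k _ => by simp [Function.comp]; ring)

lemma pyGetD_cons_shift (x : Int) (t : List Int) {i : Int} (hi : 0 ≤ i) :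
    PySem.List.pyGetD (x :: t) (i + 1) 0 = PySem.List.pyGetD t i 0 := by
  obtain ⟨n, rfl⟩ : ∃ n : Nat, i = (n : Int) := ⟨i.toNat, by omega⟩
  have h2 : (n : Int) + 1 = ((n + 1 : Nat) : Int) := by omega
  rw [h2, PySem.List.pyGetD_natCast, PySem.List.pyGetD_natCast, List.getD_cons_succ]

lemma shift_map (x : Int) (t : List Int) (a : Int) (ha : 0 ≤ a) :
    (PySem.List.pyRange (a + 1) ((t.length : Int) + 1) 2).map
        (fun i => PySem.List.pyGetD (x :: t) i 0)
      = (PySem.List.pyRange a (t.length : Int) 2).map (fun i => PySem.List.pyGetD t i 0) := by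
  rw [show ((t.length : Int) + 1) = ((t.length : Int)) + 1 from rfl, pyRange2_shift, List.map_map]
  refine List.map_congr_left (fun i hi => ?_)
  have h0 : 0 ≤ i := by
    have := (PySem.List.mem_pyRange_iff_of_pos (by norm_num : (0:Int) < 2) i).mp hi
    omega
  simpa [Function.comp] using pyGetD_cons_shift x t h0

lemma deint_maps (xs : List Int) :
    ((PySem.List.pyRange 0 (xs.length : Int) 2).map (fun i => PySem.List.pyGetD xs i 0)
       = (deint xs).1) ∧
    ((PySem.List.pyRange 1 (xs.length : Int) 2).map (fun i => PySem.List.pyGetD xs i 0)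
       = (deint xs).2) := by
  induction xs with
  | nil => simp [deint, PySem.List.pyRange_of_pos]
  | cons x t ih =>
    constructor
    · have hlen : ((x :: t).length : Int) = (t.length : Int) + 1 := by
        push_cast [List.length_cons]; ring
      have h := shift_map x t 1 (by norm_num)
      norm_num at h
      rw [hlen, pyRange2_cons (by positivity), List.map_cons]
      norm_num
      rw [h, ih.2]
      simp [deint]
    · have hlen : ((x :: t).length : Int) = (t.length : Int) + 1 := by
        push_cast [List.length_cons]; ring
      have h := shift_map x t 0 le_rfl
      norm_num at h
      rw [hlen, h, ih.1]
      simp [deint]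

lemma robber_eq_dsum (houses : List Int) :
    robber houses = dsum (deint houses).1 (deint houses).2 := by
  unfold robber
  rw [PySem.List.len_eq]
  have hcong := PySem.List.foldl_congr_mem
    (l := PySem.List.pyRange 0 (houses.length : Int) 2) (init := (0 : Int))
    (f := fun money i =>
      (PySem.List.pyRange 1 (houses.length : Int) 2).foldl
        (fun money j =>
          if PySem.List.pyGetD houses i 0 > PySem.List.pyGetD houses j 0 then
            money + PySem.List.pyGetD houses i 0
          else money + PySem.List.pyGetD houses j 0) money)
    (g := fun money i => money +
      ((PySem.List.pyRange 1 (houses.length : Int) 2).map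
        (fun j => if PySem.List.pyGetD houses i 0 > PySem.List.pyGetD houses j 0 then
            PySem.List.pyGetD houses i 0 else PySem.List.pyGetD houses j 0)).sum)
    (fun acc i _ => by
      beta_reduce
      rw [show (fun money j =>
          if PySem.List.pyGetD houses i 0 > PySem.List.pyGetD houses j 0 then
            money + PySem.List.pyGetD houses i 0
          else money + PySem.List.pyGetD houses j 0)
        = (fun money j => money +
            (if PySem.List.pyGetD houses i 0 > PySem.List.pyGetD houses j 0 then
              PySem.List.pyGetD houses i 0 else PySem.List.pyGetD houses j 0)) from
        funext fun m => funext fun j => by split_ifs <;> rfl]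
      exact PySem.List.foldl_add _ _ acc)
  rw [hcong]
  rw [PySem.List.foldl_add, zero_add]
  have h0 := (deint_maps houses).1
  have h1 := (deint_maps houses).2
  rw [dsum, ← h0, ← h1]
  simp only [List.map_map]
  rfl

lemma split_general (xs : List Int) :
    ∀ (s : Int) (e o : List Int),
      (PySem.List.enumerate xs s).foldl
        (fun acc p =>
          if PySem.Int.mod p.1 2 == 0 then (acc.1 ++ [p.2], acc.2)
          else (acc.1, acc.2 ++ [p.2])) (e, o)
      = if s % 2 = 0 then (e ++ (deint xs).1, o ++ (deint xs).2)
        else (e ++ (deint xs).2, o ++ (deint xs).1) := by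
  induction xs with
  | nil =>
    intro s e o
    rw [PySem.List.enumerate_nil, List.foldl_nil]
    split_ifs <;> simp [deint]
  | cons x t ih =>
    intro s e o
    rw [PySem.List.enumerate_cons, List.foldl_cons]
    have hs0 : PySem.Int.mod s 2 = s % 2 := PySem.Int.mod_eq_emod_of_pos (by norm_num)
    have ih' : ∀ (s' : Int) (e' o' : List Int),
        (PySem.List.enumerate t s').foldl
          (fun acc p =>
            if PySem.Int.mod p.1 2 = 0 then (acc.1 ++ [p.2], acc.2)
            else (acc.1, acc.2 ++ [p.2])) (e', o')
        = if s' % 2 = 0 then (e' ++ (deint t).1, o' ++ (deint t).2)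
          else (e' ++ (deint t).2, o' ++ (deint t).1) := by
      intro s' e' o'
      rw [← ih s' e' o']
      exact PySem.List.foldl_congr_mem _ _ _ _
        (fun acc p _ => by by_cases hm : PySem.Int.mod p.1 2 = 0 <;> simp [hm])
    simp only [hs0, beq_iff_eq]
    by_cases h : s % 2 = 0
    · rw [if_pos h, if_pos h, ih' (s + 1), if_neg (by omega)]
      simp [deint]
    · rw [if_neg h, if_neg h, ih' (s + 1), if_pos (by omega)]
      simp [deint]

lemma robberSplit_eq_deint (houses : List Int) : robberSplit houses = deint houses := by
  unfold robberSplit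
  rw [split_general houses 0 [] []]
  norm_num

lemma dsum_nil_right (es : List Int) : dsum es [] = 0 := by
  simp [dsum]

lemma dsum_cons_right (es : List Int) (o : Int) (os : List Int) :
    dsum es (o :: os) = (es.map (fun e => if e > o then e else o)).sum + dsum es os := by
  simp only [dsum, List.map_cons, List.sum_cons]
  rw [PySem.List.sum_map_add_int]

lemma dsum_perm {es es' os os' : List Int} (he : es.Perm es') (ho : os.Perm os') :
    dsum es os = dsum es' os' := by
  unfold dsum
  have h1 : ∀ e : Int, ((os.map (fun o => if e > o then e else o)).sum)
      = ((os'.map (fun o => if e > o then e else o)).sum) :=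
    fun e => List.Perm.sum_eq (ho.map _)
  calc (es.map (fun e => (os.map (fun o => if e > o then e else o)).sum)).sum
      = (es.map (fun e => (os'.map (fun o => if e > o then e else o)).sum)).sum := by
        exact congrArg List.sum (List.map_congr_left (fun e _ => h1 e))
    _ = (es'.map (fun e => (os'.map (fun o => if e > o then e else o)).sum)).sum :=
        List.Perm.sum_eq (he.map _)

-- the head of the dropped suffix bounds it below, for a sorted list
lemma sorted_drop_head_le {l : List Int} (h : List.Pairwise (fun a b : Int => a ≤ b) l)
    {i : Nat} (hi : i < l.length) : ∀ x ∈ l.drop i, l[i] ≤ x := by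
  intro x hx
  have hd : l[i] :: l.drop (i + 1) = l.drop i := List.getElem_cons_drop hi
  rw [← hd] at hx
  rcases hx with _ | hx
  · exact le_refl _
  · have hp := (List.Pairwise.drop h (i := i))
    rw [← hd] at hp
    exact (List.pairwise_cons.mp hp).1 x (by assumption)

-- invariant of the two-pointer merge loop
lemma loop_spec (es os : List Int)
    (he : List.Pairwise (fun a b : Int => a ≤ b) es)
    (ho : List.Pairwise (fun a b : Int => a ≤ b) os) :
    ∀ (n i j : Nat) (money : Int),
      (es.length - i) + (os.length - j) ≤ n → i ≤ es.length → j ≤ os.length →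
      (let r := robberLoop es os (es.length : Int) (os.length : Int) (i : Int) (j : Int) money
       r.2.2 + r.2.1 * (PySem.List.slice es (some r.1) none).sum
             + r.1 * (PySem.List.slice os (some r.2.1) none).sum)
        = money + (j : Int) * (es.drop i).sum + (i : Int) * (os.drop j).sum
            + dsum (es.drop i) (os.drop j) := by
  intro n
  induction n with
  | zero =>
    intro i j money hn hi hj
    have hieq : i = es.length := by omega
    have hjeq : j = os.length := by omega
    subst hieq hjeq
    rw [robberLoop, dif_neg (by omega)]
    simp only
    rw [PySem.List.slice_from _ (by positivity), PySem.List.slice_from _ (by positivity)]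
    simp [List.drop_length, dsum_nil_right, Int.toNat_natCast]
  | succ n ih =>
    intro i j money hn hi hj
    by_cases hij : i < es.length ∧ j < os.length
    · obtain ⟨hi', hj'⟩ := hij
      rw [robberLoop,
        dif_pos (by exact_mod_cast And.intro (by exact_mod_cast hi') (by exact_mod_cast hj'))]
      have hge : PySem.List.pyGetD es (i : Int) 0 = es[i] := by
        rw [PySem.List.pyGetD_natCast, List.getD_eq_getElem es 0 hi']
      have hgo : PySem.List.pyGetD os (j : Int) 0 = os[j] := by
        rw [PySem.List.pyGetD_natCast, List.getD_eq_getElem os 0 hj']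
      have hde : es[i] :: es.drop (i + 1) = es.drop i := List.getElem_cons_drop hi'
      have hdo : os[j] :: os.drop (j + 1) = os.drop j := List.getElem_cons_drop hj'
      rw [hge, hgo]
      by_cases hb : os[j] < es[i]
      · rw [if_pos hb]
        have hcast : ((j : Int) + 1) = ((j + 1 : Nat) : Int) := by push_cast; ring
        rw [hcast, ih i (j + 1) (money + (i : Int) * os[j]) (by omega) hi (by omega)]
        have hmax : (es.drop i).map (fun e => if e > os[j] then e else os[j]) = es.drop i := by
          rw [List.map_congr_left
              (fun e hmem => if_pos (lt_of_lt_of_le hb (sorted_drop_head_le he hi' e hmem))),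
            List.map_id']
        have hsum : (os.drop j).sum = os[j] + (os.drop (j + 1)).sum := by
          rw [← hdo, List.sum_cons]
        have hds : dsum (es.drop i) (os.drop j) =
            (es.drop i).sum + dsum (es.drop i) (os.drop (j + 1)) := by
          rw [← hdo, dsum_cons_right, hmax]
        rw [hds, hsum]
        push_cast
        ring
      · rw [if_neg hb]
        have hcast : ((i : Int) + 1) = ((i + 1 : Nat) : Int) := by push_cast; ring
        rw [hcast, ih (i + 1) j (money + (j : Int) * es[i]) (by omega) (by omega) hj]
        have hmax : (os.drop j).map (fun o => if es[i] > o then es[i] else o) = os.drop j := by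
          rw [List.map_congr_left (fun o hmem => if_neg (by
            have := sorted_drop_head_le ho hj' o hmem
            omega)), List.map_id']
        have hsum : (es.drop i).sum = es[i] + (es.drop (i + 1)).sum := by
          rw [← hde, List.sum_cons]
        have hds : dsum (es.drop i) (os.drop j) =
            (os.drop j).sum + dsum (es.drop (i + 1)) (os.drop j) := by
          rw [← hde]
          simp only [dsum, List.map_cons, List.sum_cons]
          rw [hmax]
        rw [hds, hsum]
        push_cast
        ring
    · rw [robberLoop, dif_neg (by push_cast; omega)]
      simp only
      rw [PySem.List.slice_from _ (by positivity), PySem.List.slice_from _ (by positivity)]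
      simp only [Int.toNat_natCast]
      have hnil : es.drop i = [] ∨ os.drop j = [] := by
        rcases not_and_or.mp hij with h | h
        · left; rw [List.drop_eq_nil_iff]; omega
        · right; rw [List.drop_eq_nil_iff]; omega
      rcases hnil with h | h
      · rw [h]; simp [dsum]
      · rw [h]; simp [dsum_nil_right]

lemma robber_alt_eq_dsum (houses : List Int) :
    robber_alt houses = dsum (deint houses).1 (deint houses).2 := by
  unfold robber_alt
  simp only [robberSplit_eq_deint, PySem.List.len_eq]
  have h := loop_spec (PySem.List.sorted (deint houses).1 (fun x => x) false)
    (PySem.List.sorted (deint houses).2 (fun x => x) false)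
    (PySem.List.sorted_pairwise _ _) (PySem.List.sorted_pairwise _ _)
    ((PySem.List.sorted (deint houses).1 (fun x => x) false).length
      + (PySem.List.sorted (deint houses).2 (fun x => x) false).length)
    0 0 0 (by omega) (by omega) (by omega)
  simp only [Nat.cast_zero, zero_mul, add_zero, zero_add, List.drop_zero] at h
  rw [h]
  exact dsum_perm (PySem.List.sorted_perm _ _ _) (PySem.List.sorted_perm _ _ _)

-- ===== VERDICT (by name: the statement is the Claim_ definition above) =====
theorem robber_spec : Claim_equal_robber := by
  intro houses _
  unfold Spec_robber
  rw [robber_eq_dsum, robber_alt_eq_dsum]
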